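-- pv_equiv track=rewrite | github.com/danielpinck/kniffel | points.py | kniffel
-- ===== SOURCE A (Python) =====
-- def kniffel(dice_roll):
--     kniffel_counter = 0
--     for i in dice_roll:
--         if dice_roll.count(i) > 1:
--             kniffel_counter += 1
--
--     if kniffel_counter == 5:
--         kniffel_points = 50
--
--     else:
--         kniffel_points = 0
--     return kniffel_points
-- ===== SOURCE B (Python) =====
-- def kniffel(dice_roll):
--     s = sorted(dice_roll)
--     n = len(s)
--     singles = 0
--     i = 0
--     while i < n:
--         j = i + 1
--         while j < n and s[j] == s[i]:
--             j += 1
--         if j == i + 1: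
--             singles += 1
--         i = j
--     return 50 if n - singles == 5 else 0
-- ===== Notes on version B (the rewrite author's own statement) =====
-- stated objective: alternative
-- what changed: Sorts the roll once and counts singleton runs with a run-length scan over the sorted list, returning 50 iff len - singletons == 5, instead of A's per-element list.count rescan over the whole roll.
import Mathlib
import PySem

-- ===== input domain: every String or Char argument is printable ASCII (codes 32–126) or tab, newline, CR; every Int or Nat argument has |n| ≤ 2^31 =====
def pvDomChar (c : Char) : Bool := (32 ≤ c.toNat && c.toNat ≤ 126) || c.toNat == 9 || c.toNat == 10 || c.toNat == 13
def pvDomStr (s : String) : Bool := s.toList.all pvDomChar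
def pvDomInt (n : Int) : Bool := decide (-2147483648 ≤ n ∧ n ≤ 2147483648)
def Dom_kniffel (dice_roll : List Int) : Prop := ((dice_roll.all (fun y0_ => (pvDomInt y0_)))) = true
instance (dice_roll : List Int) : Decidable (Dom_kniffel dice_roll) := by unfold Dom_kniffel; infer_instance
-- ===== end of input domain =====

-- B sorts the roll once and counts singleton runs by a run-length scan over the sorted
-- list (50 iff len - singletons == 5), instead of A's per-element list.count rescan.

-- ===== PORT A =====
def kniffel (dice_roll : List Int) : Int :=
  let kniffel_counter : Int :=
    dice_roll.foldl (fun acc i => if 1 < PySem.List.count dice_roll i then acc + 1 else acc) 0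
  if kniffel_counter = 5 then 50 else 0

-- ===== PORT B =====
-- Source B's while loop over positions i of the sorted list: each outer step stands at the suffix
-- starting at i; the inner while skips the run equal to s[i] (takeWhile/dropWhile of (== head));
-- 'j == i + 1' is exactly 'the run beyond the head is empty'; i = j moves to that suffix.
def kniffelSingles : List Int → Int
  | [] => 0
  | x :: xs =>
      (if xs.takeWhile (fun a => a == x) = [] then 1 else 0)
        + kniffelSingles (xs.dropWhile (fun a => a == x))
termination_by t => t.length
decreasing_by
  simpa using Nat.lt_succ_of_le (List.length_dropWhile_le _ _)

def kniffel_alt (dice_roll : List Int) : Int :=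
  let s := PySem.List.sorted dice_roll (fun x => x) false
  if (s.length : Int) - kniffelSingles s = 5 then 50 else 0

-- ===== PRECONDITION & SPEC =====
def Spec_kniffel (dice_roll : List Int) (out : Int) : Prop := out = kniffel_alt dice_roll
instance (dice_roll : List Int) (out : Int) : Decidable (Spec_kniffel dice_roll out) := by unfold Spec_kniffel; infer_instance

-- ===== CLAIM (what is proved, stated in full; the proofs are below) =====
def Claim_equal_kniffel : Prop := ∀ (dice_roll : List Int), Dom_kniffel dice_roll → Spec_kniffel dice_roll (kniffel dice_roll)

-- ===== LEMMAS AND PROOFS =====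

-- in a sorted list whose elements are all ≥ x, everything surviving dropWhile (== x) is > x
lemma dropWhile_gt (x : Int) : ∀ (xs : List Int), xs.Pairwise (· ≤ ·) → (∀ a ∈ xs, x ≤ a) →
    ∀ a ∈ xs.dropWhile (fun a => a == x), x < a := by
  intro xs
  induction xs with
  | nil => simp
  | cons y ys ih =>
      intro hp hle a ha
      simp only [List.dropWhile_cons] at ha
      by_cases h : (y == x) = true
      · rw [if_pos h] at ha
        exact ih hp.tail (fun b hb => hle b (List.mem_cons_of_mem _ hb)) a ha
      · rw [if_neg h] at ha
        have hne : x ≠ y := fun he => h (by simp [he.symm])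
        have hyx : x < y := lt_of_le_of_ne (hle y (List.mem_cons_self ..)) hne
        rcases List.mem_cons.mp ha with rfl | ha
        · exact hyx
        · exact lt_of_lt_of_le hyx (List.rel_of_pairwise_cons hp ha)

-- on a ≤-sorted list, the run-length recursion counts the elements whose count is exactly 1
lemma singles_eq_countP_aux (n : Nat) : ∀ (s : List Int), s.length ≤ n → s.Pairwise (· ≤ ·) →
    kniffelSingles s = (s.countP (fun a => s.count a == 1) : Int) := by
  induction n with
  | zero =>
      intro s hlen _
      have : s = [] := List.eq_nil_of_length_eq_zero (Nat.le_zero.mp hlen)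
      subst this; simp [kniffelSingles]
  | succ n ih =>
      intro s hlen hs
      match s with
      | [] => simp [kniffelSingles]
      | x :: xs =>
        set t := xs.takeWhile (fun a => a == x) with ht_def
        set r := xs.dropWhile (fun a => a == x) with hr_def
        have hxs_le : ∀ a ∈ xs, x ≤ a := fun a ha => List.rel_of_pairwise_cons hs ha
        have hr_gt : ∀ a ∈ r, x < a := dropWhile_gt x xs hs.tail hxs_le
        have ht_eq : ∀ a ∈ t, a = x := fun a ha => by
          simpa using List.mem_takeWhile_imp ha
        have hsplit : xs = t ++ r := (List.takeWhile_append_dropWhile ..).symm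
        have hr_sorted : r.Pairwise (· ≤ ·) := hs.tail.sublist (List.dropWhile_sublist _)
        have hr_len : r.length ≤ n := by
          have h1 : r.length ≤ xs.length := List.length_dropWhile_le _ _
          have h2 : xs.length + 1 ≤ n + 1 := by simpa using hlen
          omega
        have hIH := ih r hr_len hr_sorted
        -- counts in s = x :: t ++ r
        have hcx : (x :: xs).count x = t.length + 1 := by
          rw [hsplit]
          have h1 : t.count x = t.length := List.count_eq_length.mpr (fun b hb => (ht_eq b hb).symm)
          have h2 : r.count x = 0 := List.count_eq_zero_of_not_mem (fun hx => lt_irrefl x (hr_gt x hx))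
          simp [List.count_append, h1, h2]
        have hcr : ∀ a ∈ r, (x :: xs).count a = r.count a := by
          intro a ha
          have hax : a ≠ x := fun h => lt_irrefl x (h ▸ hr_gt a ha)
          have h2 : t.count a = 0 :=
            List.count_eq_zero_of_not_mem (fun hat => hax (ht_eq a hat))
          rw [hsplit]
          simp [List.count_append, h2, Ne.symm hax]
        -- countP decomposition
        have hpx : ((x :: xs).count x == 1) = decide (t = []) := by
          rw [hcx]
          rcases t with _ | ⟨b, tb⟩ <;> simp
        have hpt : t.countP (fun a => (x :: xs).count a == 1) = 0 := by
          rw [List.countP_eq_zero]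
          intro a ha
          rw [ht_eq a ha, hpx]
          have : t ≠ [] := List.ne_nil_of_mem ha
          simpa using this
        have hpr : r.countP (fun a => (x :: xs).count a == 1)
            = r.countP (fun a => r.count a == 1) :=
          List.countP_congr (fun a ha => by rw [hcr a ha])
        have hsplitP : ∀ q : Int → Bool, xs.countP q = t.countP q + r.countP q := by
          intro q
          rw [hsplit, List.countP_append]
        have hcount : (x :: xs).countP (fun a => (x :: xs).count a == 1)
            = (if t = [] then 1 else 0) + r.countP (fun a => r.count a == 1) := by
          rw [List.countP_cons, hsplitP _, hpt, hpr, hpx]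
          by_cases h : t = []
          · simp [h]; omega
          · simp [h]
        -- assemble
        rw [kniffelSingles, ← ht_def, ← hr_def, hIH, hcount]
        push_cast
        by_cases h : t = []
        · simp [h]
        · simp [h]

-- ===== VERDICT (by name: the statement is the Claim_ definition above) =====
theorem kniffel_spec : Claim_equal_kniffel := by
  intro xs _
  unfold Spec_kniffel kniffel kniffel_alt
  dsimp only
  set s := PySem.List.sorted xs (fun x => x) false with hs_def
  have hperm : s.Perm xs := PySem.List.sorted_perm ..
  have hsorted : s.Pairwise (· ≤ ·) := by
    simpa using PySem.List.sorted_pairwise (xs := xs) (key := fun x => x)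
  -- A's loop is a countP
  have hA : xs.foldl (fun acc i => if 1 < PySem.List.count xs i then acc + 1 else acc) 0
      = (xs.countP (fun i => decide (1 < xs.count i)) : Int) := by
    have h := PySem.List.foldl_if_add_one
      (p := fun i => decide (1 < PySem.List.count xs i)) (l := xs) (a := (0 : Int))
    simpa [PySem.List.count_eq] using h
  -- B's singles is a countP over xs
  have hB : kniffelSingles s = (xs.countP (fun a => xs.count a == 1) : Int) := by
    rw [singles_eq_countP_aux s.length s le_rfl hsorted]
    congr 1
    exact hperm.countP_congr (fun a _ => by rw [hperm.count_eq])
  -- complement: on members, count > 1 ↔ ¬(count = 1)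
  have hcompl : xs.countP (fun i => decide (1 < xs.count i))
      = xs.countP (fun a => !(xs.count a == 1)) := by
    apply List.countP_congr
    intro a ha
    have h1 : 1 ≤ xs.count a := List.one_le_count_iff.mpr ha
    by_cases h : xs.count a = 1
    · simp [h]
    · simp [h]; omega
  have hlen : xs.length = xs.countP (fun a => xs.count a == 1)
      + xs.countP (fun a => !(xs.count a == 1)) := by
    simpa using List.length_eq_countP_add_countP (p := fun a => xs.count a == 1) (l := xs)
  have hslen : s.length = xs.length := hperm.length_eq
  rw [hA, hB, hslen]
  have hcond : ((xs.countP (fun i => decide (1 < xs.count i)) : Int) = 5)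
      ↔ ((xs.length : Int) - (xs.countP (fun a => xs.count a == 1) : Int) = 5) := by
    rw [hcompl]; omega
  by_cases h : (xs.countP (fun i => decide (1 < xs.count i)) : Int) = 5
  · rw [if_pos h, if_pos (hcond.mp h)]
  · rw [if_neg h, if_neg (fun hc => h (hcond.mpr hc))]
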